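-- pv_equiv track=rewrite | github.com/FrederikWilmotte/adventofcode2020 | 20201212/aoc20201212pt2.py | change_facing
-- ===== SOURCE A (Python) =====
-- def change_facing(direction, degrees, ew_way_old, ns_way_old):
--     ew_way = ew_way_old
--     ns_way = ns_way_old
--     turns = degrees / 90
--     turns = int(turns % 4)
--     for i in range(turns):
--         if direction == "L":
--             ew_way = -ns_way_old
--             ns_way = ew_way_old
--             ew_way_old = ew_way
--             ns_way_old = ns_way
--         else:
--             ew_way = ns_way_old
--             ns_way = -ew_way_old
--             ew_way_old = ew_way
--             ns_way_old = ns_way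
--     return ew_way, ns_way
-- ===== SOURCE B (Python) =====
-- def change_facing(direction, degrees, ew_way_old, ns_way_old):
--     t = int((degrees / 90) % 4)
--     if direction == "L":
--         table = [(ew_way_old, ns_way_old), (-ns_way_old, ew_way_old),
--                  (-ew_way_old, -ns_way_old), (ns_way_old, -ew_way_old)]
--     else:
--         table = [(ew_way_old, ns_way_old), (ns_way_old, -ew_way_old),
--                  (-ew_way_old, -ns_way_old), (-ns_way_old, ew_way_old)]
--     return table[t]
-- ===== Notes on version B (the rewrite author's own statement) =====
-- stated objective: simpler
-- what changed: Replaces the stateful 0-3 iteration loop that re-rotates the waypoint one quarter-turn at a time with a direct four-entry rotation table indexed by the number of quarter turns.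
import Mathlib
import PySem

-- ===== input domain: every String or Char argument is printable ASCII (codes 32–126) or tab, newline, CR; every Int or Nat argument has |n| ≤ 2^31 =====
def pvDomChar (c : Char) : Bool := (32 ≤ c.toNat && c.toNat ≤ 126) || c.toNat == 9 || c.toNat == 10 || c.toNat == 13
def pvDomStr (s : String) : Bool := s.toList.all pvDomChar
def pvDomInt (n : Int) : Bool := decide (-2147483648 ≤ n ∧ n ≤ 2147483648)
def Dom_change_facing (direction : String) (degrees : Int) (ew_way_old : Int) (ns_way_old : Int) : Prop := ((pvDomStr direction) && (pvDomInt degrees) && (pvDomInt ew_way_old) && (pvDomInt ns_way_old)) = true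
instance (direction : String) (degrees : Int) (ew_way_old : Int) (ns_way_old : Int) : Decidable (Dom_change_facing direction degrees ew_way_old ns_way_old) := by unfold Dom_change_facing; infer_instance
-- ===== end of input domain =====

-- B replaces A's stateful quarter-turn loop with a direct four-entry rotation table (objective: simpler).


-- ===== PORT A =====
-- A's loop body, iterated 'turns' times over the state (ew_way, ns_way, ew_way_old, ns_way_old).
def changeFacingLoop (direction : String) : Nat → Int × Int × Int × Int → Int × Int × Int × Int
  | 0, s => s
  | n + 1, (_, _, ewo, nso) =>
      if direction == "L" then
        changeFacingLoop direction n (-nso, ewo, -nso, ewo)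
      else
        changeFacingLoop direction n (nso, -ewo, nso, -ewo)

-- 'int((degrees / 90) % 4)' uses float division; for |degrees| ≤ 2^31 the float result of
-- the /, % and int() truncation is exactly the integer (degrees // 90) % 4, ported as such.
def change_facing (direction : String) (degrees : Int) (ew_way_old : Int) (ns_way_old : Int) : Int × Int :=
  let turns : Nat := (PySem.Int.mod (PySem.Int.floordiv degrees 90) 4).toNat
  let s := changeFacingLoop direction turns (ew_way_old, ns_way_old, ew_way_old, ns_way_old)
  (s.1, s.2.1)

-- ===== PORT B =====
-- same exact turn count (see the float note above), then a four-entry rotation table.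
def change_facing_alt (direction : String) (degrees : Int) (ew_way_old : Int) (ns_way_old : Int) : Int × Int :=
  let t : Int := PySem.Int.mod (PySem.Int.floordiv degrees 90) 4
  if direction == "L" then
    if t = 1 then (-ns_way_old, ew_way_old)
    else if t = 2 then (-ew_way_old, -ns_way_old)
    else if t = 3 then (ns_way_old, -ew_way_old)
    else (ew_way_old, ns_way_old)
  else
    if t = 1 then (ns_way_old, -ew_way_old)
    else if t = 2 then (-ew_way_old, -ns_way_old)
    else if t = 3 then (-ns_way_old, ew_way_old)
    else (ew_way_old, ns_way_old)

-- ===== PRECONDITION & SPEC =====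
def Spec_change_facing (direction : String) (degrees : Int) (ew_way_old : Int) (ns_way_old : Int) (out : Int × Int) : Prop := out = change_facing_alt direction degrees ew_way_old ns_way_old
instance (direction : String) (degrees : Int) (ew_way_old : Int) (ns_way_old : Int) (out : Int × Int) : Decidable (Spec_change_facing direction degrees ew_way_old ns_way_old out) := by unfold Spec_change_facing; infer_instance

-- ===== CLAIM (what is proved, stated in full; the proofs are below) =====
def Claim_equal_change_facing : Prop := ∀ (direction : String) (degrees : Int) (ew_way_old : Int) (ns_way_old : Int), Dom_change_facing direction degrees ew_way_old ns_way_old → Spec_change_facing direction degrees ew_way_old ns_way_old (change_facing direction degrees ew_way_old ns_way_old)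

-- ===== LEMMAS AND PROOFS =====
theorem mod4_cases (a : Int) :
    PySem.Int.mod a 4 = 0 ∨ PySem.Int.mod a 4 = 1 ∨ PySem.Int.mod a 4 = 2 ∨ PySem.Int.mod a 4 = 3 := by
  have h0 := PySem.Int.mod_nonneg a (b := 4) (by norm_num)
  have h1 := PySem.Int.mod_lt a (b := 4) (by norm_num)
  omega

-- ===== VERDICT (by name: the statement is the Claim_ definition above) =====
theorem change_facing_spec : Claim_equal_change_facing := by
  intro direction degrees ewo nso _
  unfold Spec_change_facing change_facing change_facing_alt
  rcases mod4_cases (PySem.Int.floordiv degrees 90) with h | h | h | h <;>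
    rw [h] <;> by_cases hd : direction == "L" <;>
    simp [hd, changeFacingLoop]
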